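-- pv_equiv track=rewrite | github.com/s1AINT/NeuroProgram | services/attention_analysis.py | analyze_sub_block
-- ===== SOURCE A (Python) =====
-- def analyze_sub_block(frame_statuses):
--     if all(status == "FaceNotDetected" for status in frame_statuses):
--         return "PersonNotFound"
--     if all(status == "ClosedEyes" for status in frame_statuses):
--         return "Sleeping"
--     if all(status in ["HeadTurnedLeft", "HeadTurnedRight"] for status in frame_statuses):
--         return "HeadTurned"
--     if "OpenEyes" in frame_statuses and "ClosedEyes" in frame_statuses:
--         return "Blinked"
--
--     return "OpenEyes"
-- ===== SOURCE B (Python) =====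
-- def analyze_sub_block(frame_statuses):
--     all_face = all_closed = all_head = True
--     has_open = has_closed = False
--     for s in frame_statuses:
--         all_face = all_face and s == "FaceNotDetected"
--         all_closed = all_closed and s == "ClosedEyes"
--         all_head = all_head and (s == "HeadTurnedLeft" or s == "HeadTurnedRight")
--         has_open = has_open or s == "OpenEyes"
--         has_closed = has_closed or s == "ClosedEyes"
--     if all_face:
--         return "PersonNotFound"
--     if all_closed:
--         return "Sleeping"
--     if all_head:
--         return "HeadTurned"
--     if has_open and has_closed:
--         return "Blinked"
--     return "OpenEyes"
-- ===== Notes on version B (the rewrite author's own statement) =====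
-- stated objective: alternative
-- what changed: Replaces A's five separate traversals (three all(...) generator passes plus two 'in' membership scans) by one explicit loop maintaining five boolean flags, classifying once at the end.
import Mathlib
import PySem

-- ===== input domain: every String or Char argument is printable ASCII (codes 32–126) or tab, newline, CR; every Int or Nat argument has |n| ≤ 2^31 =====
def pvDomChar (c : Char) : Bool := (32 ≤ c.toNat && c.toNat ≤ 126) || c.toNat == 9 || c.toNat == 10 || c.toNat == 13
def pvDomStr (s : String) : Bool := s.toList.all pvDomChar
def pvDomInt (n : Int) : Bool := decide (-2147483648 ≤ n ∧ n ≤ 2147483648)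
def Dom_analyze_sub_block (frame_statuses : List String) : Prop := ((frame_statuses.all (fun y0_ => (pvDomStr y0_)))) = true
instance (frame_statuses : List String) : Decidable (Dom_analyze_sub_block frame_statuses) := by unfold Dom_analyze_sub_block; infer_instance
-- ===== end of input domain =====

-- B replaces A's five separate traversals (three all(...) passes, two membership scans) by one explicit loop maintaining five boolean flags.
-- ===== PORT A =====
def analyze_sub_block (frame_statuses : List String) : String :=
  if frame_statuses.all (fun status => status == "FaceNotDetected") then "PersonNotFound"
  else if frame_statuses.all (fun status => status == "ClosedEyes") then "Sleeping"
  else if frame_statuses.all (fun status => status == "HeadTurnedLeft" || status == "HeadTurnedRight") then "HeadTurned"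
  else if frame_statuses.contains "OpenEyes" && frame_statuses.contains "ClosedEyes" then "Blinked"
  else "OpenEyes"

-- ===== PORT B =====
def analyze_sub_block_alt (frame_statuses : List String) : String :=
  let r := frame_statuses.foldl
    (fun (st : Bool × Bool × Bool × Bool × Bool) s =>
      (st.1 && s == "FaceNotDetected",
       st.2.1 && s == "ClosedEyes",
       st.2.2.1 && (s == "HeadTurnedLeft" || s == "HeadTurnedRight"),
       st.2.2.2.1 || s == "OpenEyes",
       st.2.2.2.2 || s == "ClosedEyes"))
    (true, true, true, false, false)
  if r.1 then "PersonNotFound"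
  else if r.2.1 then "Sleeping"
  else if r.2.2.1 then "HeadTurned"
  else if r.2.2.2.1 && r.2.2.2.2 then "Blinked"
  else "OpenEyes"

-- ===== PRECONDITION & SPEC =====
def Spec_analyze_sub_block (frame_statuses : List String) (out : String) : Prop := out = analyze_sub_block_alt frame_statuses
instance (frame_statuses : List String) (out : String) : Decidable (Spec_analyze_sub_block frame_statuses out) := by unfold Spec_analyze_sub_block; infer_instance

-- ===== CLAIM (what is proved, stated in full; the proofs are below) =====
def Claim_equal_analyze_sub_block : Prop := ∀ (frame_statuses : List String), Dom_analyze_sub_block frame_statuses → Spec_analyze_sub_block frame_statuses (analyze_sub_block frame_statuses)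

-- ===== LEMMAS AND PROOFS =====

-- ===== VERDICT (by name: the statement is the Claim_ definition above) =====
lemma flags_eq (fs : List String) (a b c d e : Bool) :
    fs.foldl
      (fun (st : Bool × Bool × Bool × Bool × Bool) s =>
        (st.1 && s == "FaceNotDetected",
         st.2.1 && s == "ClosedEyes",
         st.2.2.1 && (s == "HeadTurnedLeft" || s == "HeadTurnedRight"),
         st.2.2.2.1 || s == "OpenEyes",
         st.2.2.2.2 || s == "ClosedEyes"))
      (a, b, c, d, e)
    = (a && fs.all (fun s => s == "FaceNotDetected"),
       b && fs.all (fun s => s == "ClosedEyes"),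
       c && fs.all (fun s => s == "HeadTurnedLeft" || s == "HeadTurnedRight"),
       d || fs.any (fun s => s == "OpenEyes"),
       e || fs.any (fun s => s == "ClosedEyes")) := by
  induction fs generalizing a b c d e with
  | nil => simp
  | cons h t ih =>
      simp only [List.foldl_cons, List.all_cons, List.any_cons, ih]
      simp [Bool.and_assoc, Bool.or_assoc]

theorem analyze_sub_block_spec : Claim_equal_analyze_sub_block := by
  intro fs _
  unfold Spec_analyze_sub_block analyze_sub_block analyze_sub_block_alt
  simp only [flags_eq, Bool.true_and, Bool.false_or, List.contains_eq_any_beq]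
  simp [BEq.comm]
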